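-- pv_equiv track=rewrite | github.com/xkaaaaa/GestroKey | src/app/gesture_parser.py | _find_repeating_pattern
-- ===== SOURCE A (Python) =====
-- from typing import List, Dict, Optional
--
-- def _find_repeating_pattern(directions: List[str]) -> Optional[List[str]]:
--     """查找重复模式"""
--     if len(directions) < 4:
--         return None
--
--     # 查找最小重复单元
--     for pattern_length in range(2, min(6, len(directions)//2)):
--         pattern = directions[:pattern_length]
--         next_pattern = directions[pattern_length:2*pattern_length]
--
--         if pattern == next_pattern:
--             # 检查是否还有更多重复
--             i = 2 * pattern_length
--             while i + pattern_length <= len(directions):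
--                 if directions[i:i+pattern_length] != pattern:
--                     break
--                 i += pattern_length
--
--             # 返回完整的重复模式
--             return directions[:i]
--
--     return None
-- ===== SOURCE B (Python) =====
-- from typing import List, Optional
--
-- def _find_repeating_pattern(directions: List[str]) -> Optional[List[str]]:
--     """Element-wise periodicity scan over candidate periods; no explicit length
--     guard (for len(directions) < 4 the candidate range is empty anyway)."""
--     n = len(directions)
--     p = 2
--     while p < min(6, n // 2):
--         j = 0
--         while j < n and directions[j] == directions[j % p]:
--             j += 1
--         if j // p >= 2:
--             return directions[:j - j % p]
--         p += 1
--     return None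
-- ===== Notes on version B (the rewrite author's own statement) =====
-- stated objective: alternative
-- what changed: Replaces A's block-slice comparisons (prefix vs next slice, then a while-loop comparing whole p-length slices, guarded by an explicit len<4 check) with a while-loop over candidate periods that does one element-wise periodicity scan (j advances while directions[j] == directions[j % p]) and truncates to the last full block; the len<4 case falls out of the empty candidate range.
import Mathlib
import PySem

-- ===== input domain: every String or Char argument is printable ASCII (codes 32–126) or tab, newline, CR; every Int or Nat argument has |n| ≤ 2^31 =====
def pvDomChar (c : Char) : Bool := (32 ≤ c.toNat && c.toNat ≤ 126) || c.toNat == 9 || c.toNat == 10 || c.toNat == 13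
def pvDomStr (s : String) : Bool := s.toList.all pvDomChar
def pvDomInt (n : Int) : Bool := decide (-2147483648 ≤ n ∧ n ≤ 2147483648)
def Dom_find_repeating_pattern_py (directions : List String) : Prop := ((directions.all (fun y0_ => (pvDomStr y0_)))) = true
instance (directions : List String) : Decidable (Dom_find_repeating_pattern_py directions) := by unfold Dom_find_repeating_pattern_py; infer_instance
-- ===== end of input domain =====

-- B replaces A's block-slice comparisons under a for-loop (and its explicit len<4 guard)
-- by a while-loop over candidate periods doing one element-wise periodicity scan each
-- (objective: alternative).

-- ===== PORT A =====
-- while i + p <= len(xs): if xs[i:i+p] != pattern: break; i += p   (returns final i)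
-- slice xs[i:i+p] with 0 ≤ i, p: exactly (xs.drop i).take p; indices are nonneg so Nat is exact.
def aLoop (xs pattern : List String) (p i : Nat) : Nat :=
  if _h : i + p ≤ xs.length ∧ 0 < p then
    if (xs.drop i).take p ≠ pattern then i else aLoop xs pattern p (i + p)
  else i
termination_by xs.length + 1 - i
decreasing_by omega

-- for pattern_length in range(2, min(6, len//2)): …  (range over nonneg ints, exact as Nats)
def aFor (xs : List String) : List Nat → Option (List String)
  | [] => none
  | p :: rest =>
    let pattern := xs.take p
    let next_pattern := (xs.drop p).take p
    if pattern = next_pattern then some (xs.take (aLoop xs pattern p (2 * p)))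
    else aFor xs rest

def find_repeating_pattern_py (directions : List String) : Option (List String) :=
  if directions.length < 4 then none
  else aFor directions (List.range' 2 (min 6 (directions.length / 2) - 2))

-- ===== PORT B =====
-- inner while: j += 1 while j < n and directions[j] == directions[j % p]
-- (returns final j; indices are in range, so plain getD is exact)
def bScan (xs : List String) (p j : Nat) : Nat :=
  if _h : j < xs.length then
    if xs.getD j "" = xs.getD (j % p) "" then bScan xs p (j + 1) else j
  else j
termination_by xs.length - j
decreasing_by omega

-- outer while over the candidate period p (p += 1 until p ≥ min(6, n//2))
def bWhile (xs : List String) (p : Nat) : Option (List String) :=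
  if _h : p < min 6 (xs.length / 2) then
    let j := bScan xs p 0
    if 2 ≤ j / p then some (xs.take (j - j % p)) else bWhile xs (p + 1)
  else none
termination_by min 6 (xs.length / 2) - p
decreasing_by omega

def find_repeating_pattern_py_alt (directions : List String) : Option (List String) :=
  bWhile directions 2

-- ===== PRECONDITION & SPEC =====
def Spec_find_repeating_pattern_py (directions : List String) (out : Option (List String)) : Prop := out = find_repeating_pattern_py_alt directions
instance (directions : List String) (out : Option (List String)) : Decidable (Spec_find_repeating_pattern_py directions out) := by unfold Spec_find_repeating_pattern_py; infer_instance

-- ===== CLAIM (what is proved, stated in full; the proofs are below) =====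
def Claim_equal_find_repeating_pattern_py : Prop := ∀ (directions : List String), Dom_find_repeating_pattern_py directions → Spec_find_repeating_pattern_py directions (find_repeating_pattern_py directions)

-- ===== LEMMAS AND PROOFS =====

-- characterisation of B's scan: it returns the first index ≥ j violating periodicity, capped at the length
theorem bScan_char (xs : List String) (p : Nat) :
    ∀ j, j ≤ xs.length →
      j ≤ bScan xs p j ∧ bScan xs p j ≤ xs.length ∧
      (∀ k, j ≤ k → k < bScan xs p j → xs.getD k "" = xs.getD (k % p) "") ∧
      (bScan xs p j < xs.length → xs.getD (bScan xs p j) "" ≠ xs.getD (bScan xs p j % p) "") := by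
  have main : ∀ d j, xs.length - j ≤ d → j ≤ xs.length →
      j ≤ bScan xs p j ∧ bScan xs p j ≤ xs.length ∧
      (∀ k, j ≤ k → k < bScan xs p j → xs.getD k "" = xs.getD (k % p) "") ∧
      (bScan xs p j < xs.length → xs.getD (bScan xs p j) "" ≠ xs.getD (bScan xs p j % p) "") := by
    intro d
    induction d with
    | zero =>
      intro j hd hj
      have h1 : ¬ j < xs.length := by omega
      rw [bScan, dif_neg h1]
      exact ⟨le_rfl, hj, fun k hk1 hk2 => by omega, fun h => absurd h h1⟩
    | succ d ih =>
      intro j hd hj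
      by_cases h1 : j < xs.length
      · by_cases h2 : xs.getD j "" = xs.getD (j % p) ""
        · rw [bScan, dif_pos h1, if_pos h2]
          obtain ⟨ha, hb, hc, hd'⟩ := ih (j+1) (by omega) (by omega)
          refine ⟨by omega, hb, ?_, hd'⟩
          intro k hk1 hk2
          rcases Nat.eq_or_lt_of_le hk1 with rfl | h
          · exact h2
          · exact hc k h hk2
        · rw [bScan, dif_pos h1, if_neg h2]
          exact ⟨le_rfl, by omega, fun k hk1 hk2 => by omega, fun _ => h2⟩
      · rw [bScan, dif_neg h1]
        exact ⟨le_rfl, hj, fun k hk1 hk2 => by omega, fun h => absurd h h1⟩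
  exact fun j hj => main (xs.length - j) j le_rfl hj


-- block equality as an element-wise statement
theorem block_eq (xs : List String) (p a : Nat) (hp : 0 < p) (ha : a + p ≤ xs.length) :
    ((xs.drop a).take p = xs.take p) ↔ ∀ t < p, xs.getD (a + t) "" = xs.getD t "" := by
  constructor
  · intro h t ht
    have h1 : a + t < xs.length := by omega
    have h2 : t < xs.length := by omega
    have h3 : ((xs.drop a).take p)[t]'(by simp; omega) = (xs.take p)[t]'(by simp; omega) := by
      simp [h]
    simp only [List.getElem_take, List.getElem_drop] at h3
    rw [List.getD_eq_getElem xs "" h1, List.getD_eq_getElem xs "" h2]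
    exact h3
  · intro h
    apply List.ext_getElem (by simp; omega)
    intro i hi1 hi2
    simp only [List.getElem_take, List.getElem_drop]
    have hti : i < p := by simp at hi1; omega
    have := h i hti
    rwa [List.getD_eq_getElem xs "" (by omega), List.getD_eq_getElem xs "" (by omega)] at this


-- A's stepping loop lands exactly on B's full-block boundary
theorem aLoop_eq (xs : List String) (p : Nat) (hp : 0 < p) (m : Nat) (hm : m ≤ xs.length)
    (hP : ∀ k < m, xs.getD k "" = xs.getD (k % p) "")
    (hMiss : m < xs.length → xs.getD m "" ≠ xs.getD (m % p) "") :
    ∀ i, p ∣ i → i ≤ (m / p) * p → aLoop xs (xs.take p) p i = (m / p) * p := by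
  have hdm : p * (m / p) + m % p = m := Nat.div_add_mod m p
  have hcomm : p * (m / p) = (m / p) * p := Nat.mul_comm _ _
  have hmod : m % p < p := Nat.mod_lt _ hp
  have main : ∀ d i, (m / p) * p - i ≤ d → p ∣ i → i ≤ (m / p) * p →
      aLoop xs (xs.take p) p i = (m / p) * p := by
    intro d
    induction d with
    | zero =>
      intro i hd hdvd hle
      have hieq : i = (m / p) * p := by omega
      subst hieq
      rw [aLoop]
      by_cases hg : (m / p) * p + p ≤ xs.length ∧ 0 < p
      · rw [dif_pos hg, if_pos]
        have hmn : m < xs.length := by omega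
        have hne := hMiss hmn
        intro hall
        rw [block_eq xs p _ hp hg.1] at hall
        have h1 := hall (m % p) hmod
        have h2 : (m / p) * p + m % p = m := by omega
        rw [h2] at h1
        exact hne h1
      · rw [dif_neg hg]
    | succ d ih =>
      intro i hd hdvd hle
      rcases Nat.eq_or_lt_of_le hle with heq | hlt
      · exact ih i (by omega) hdvd hle
      · obtain ⟨c, rfl⟩ := hdvd
        have hc1 : p * c + p ≤ (m / p) * p := by
          have : c < m / p := Nat.lt_of_mul_lt_mul_left (a := p) (by omega)
          have := Nat.mul_le_mul_left p this
          calc p * c + p = p * (c + 1) := by ring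
            _ ≤ p * (m / p) := by omega
            _ = (m / p) * p := hcomm
        rw [aLoop, dif_pos ⟨by omega, hp⟩, if_neg]
        · exact ih (p * c + p) (by omega) ⟨c + 1, by ring⟩ (by omega)
        · intro hne
          apply hne
          rw [block_eq xs p _ hp (by omega)]
          intro t ht
          have hk : p * c + t < m := by omega
          have := hP _ hk
          rwa [Nat.mul_add_mod, Nat.mod_eq_of_lt ht] at this
  exact fun i => main ((m / p) * p - i) i le_rfl


-- the first two blocks coincide iff the scan covers at least two full blocks
theorem two_blocks_iff (xs : List String) (p : Nat) (hp : 2 ≤ p) (hn : 2 * p ≤ xs.length) :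
    (xs.take p = (xs.drop p).take p) ↔ 2 ≤ bScan xs p 0 / p := by
  have hp0 : 0 < p := by omega
  obtain ⟨c0, c1, c2, c3⟩ := bScan_char xs p 0 (by omega)
  rw [Nat.le_div_iff_mul_le hp0]
  constructor
  · intro hblk
    by_contra hlt
    have hm2p : bScan xs p 0 < 2 * p := by omega
    have hmn : bScan xs p 0 < xs.length := by omega
    apply c3 hmn
    rcases Nat.lt_or_ge (bScan xs p 0) p with h | h
    · rw [Nat.mod_eq_of_lt h]
    · have hmod : bScan xs p 0 % p = bScan xs p 0 - p := by
        rw [Nat.mod_eq_sub_mod h, Nat.mod_eq_of_lt (by omega)]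
      rw [hmod]
      have hb := (block_eq xs p p hp0 (by omega)).1 hblk.symm
      have := hb (bScan xs p 0 - p) (by omega)
      rwa [Nat.add_sub_cancel' h] at this
  · intro hfb
    symm
    rw [block_eq xs p p hp0 (by omega)]
    intro t ht
    have := c2 (p + t) (by omega) (by omega)
    rwa [Nat.add_mod_left, Nat.mod_eq_of_lt ht] at this


-- A's for-loop over the remaining candidates equals B's while-loop started at p
theorem loop_eq (xs : List String) :
    ∀ d p, min 6 (xs.length / 2) - p ≤ d → 2 ≤ p →
      aFor xs (List.range' p (min 6 (xs.length / 2) - p)) = bWhile xs p := by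
  intro d
  induction d with
  | zero =>
    intro p hd hp
    have h1 : ¬ p < min 6 (xs.length / 2) := by omega
    have h2 : min 6 (xs.length / 2) - p = 0 := by omega
    rw [h2, bWhile, dif_neg h1]
    rfl
  | succ d ih =>
    intro p hd hp
    by_cases h1 : p < min 6 (xs.length / 2)
    · have h2 : min 6 (xs.length / 2) - p = (min 6 (xs.length / 2) - (p + 1)) + 1 := by omega
      rw [h2, List.range'_succ, bWhile, dif_pos h1]
      have hn : 2 * p ≤ xs.length := by omega
      have hiff := two_blocks_iff xs p hp hn
      simp only [aFor]
      by_cases hc : xs.take p = (xs.drop p).take p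
      · rw [if_pos hc, if_pos (hiff.1 hc)]
        obtain ⟨c0, c1, c2, c3⟩ := bScan_char xs p 0 (by omega)
        rw [aLoop_eq xs p (by omega) (bScan xs p 0) c1 (fun k hk => c2 k (by omega) hk) c3
          (2 * p) ⟨2, by ring⟩ (by have := Nat.mul_le_mul_right p (hiff.1 hc); omega)]
        have hdm := Nat.div_add_mod (bScan xs p 0) p
        have heq : bScan xs p 0 / p * p = bScan xs p 0 - bScan xs p 0 % p := by
          rw [Nat.mul_comm]; omega
        rw [heq]
      · rw [if_neg hc, if_neg (fun h2 => hc (hiff.2 h2))]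
        exact ih (p + 1) (by omega) (by omega)
    · have h2 : min 6 (xs.length / 2) - p = 0 := by omega
      rw [h2, bWhile, dif_neg h1]
      rfl

-- ===== VERDICT (by name: the statement is the Claim_ definition above) =====
theorem find_repeating_pattern_py_spec : Claim_equal_find_repeating_pattern_py := by
  intro xs _
  unfold Spec_find_repeating_pattern_py find_repeating_pattern_py find_repeating_pattern_py_alt
  split
  · rename_i h
    have h1 : ¬ 2 < min 6 (xs.length / 2) := by omega
    rw [bWhile, dif_neg h1]
  · exact loop_eq xs (min 6 (xs.length / 2) - 2) 2 le_rfl le_rfl
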